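-- pv_equiv track=rewrite | github.com/box-lin/PyIsTheBestLang | src/greedy/brain_storming/problem.py | lc_2592
-- ===== SOURCE A (Python) =====
-- from typing import List
--
-- def lc_2592(nums: List[int]) -> int:
--     """
--     url: https://leetcode.cn/problems/maximize-greatness-of-an-array/
--     tag: classical|greedy|sort|two_pointers
--     """
--     # classicalgreedysorting后two_pointers
--     n = len(nums)
--     nums.sort()
--     j = 0
--     ans = 0
--     for i in range(n):
--         while j < n and nums[i] >= nums[j]:
--             j += 1
--         if j < n:
--             ans += 1
--             j += 1
--     return ans
-- ===== SOURCE B (Python) =====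
-- from typing import List
--
-- def lc_2592(nums: List[int]) -> int:
--     # greatness = n - (largest multiplicity): sort, scan maximal runs of
--     # equal values, return n minus the longest run.
--     nums.sort()
--     n = len(nums)
--     best = 0
--     i = 0
--     while i < n:
--         j = i + 1
--         while j < n and nums[j] == nums[i]:
--             j += 1
--         if j - i > best:
--             best = j - i
--         i = j
--     return n - best
-- ===== Notes on version B (the rewrite author's own statement) =====
-- stated objective: simpler
-- what changed: Replaces the two-pointer greedy matching after the sort by a run-length scan of the sorted array and the closed form n - (longest run of equal values).
import Mathlib
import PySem

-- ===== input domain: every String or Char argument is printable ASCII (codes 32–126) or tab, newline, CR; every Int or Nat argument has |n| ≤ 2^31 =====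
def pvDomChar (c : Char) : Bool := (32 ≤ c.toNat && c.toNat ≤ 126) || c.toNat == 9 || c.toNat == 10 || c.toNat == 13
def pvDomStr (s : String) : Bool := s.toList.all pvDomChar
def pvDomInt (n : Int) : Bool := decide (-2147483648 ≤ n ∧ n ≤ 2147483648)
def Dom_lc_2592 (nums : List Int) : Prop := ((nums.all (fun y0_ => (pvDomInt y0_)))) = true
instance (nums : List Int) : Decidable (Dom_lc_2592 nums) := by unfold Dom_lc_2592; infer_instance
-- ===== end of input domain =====

-- B replaces A's two-pointer greedy matching by a run-length scan of the sorted
-- array and the closed form n - (longest run of equal values); equivalence is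
-- about the RETURN value (both Pythons sort `nums` in place the same way).

-- ===== PORT A =====
-- inner `while j < n and nums[i] >= nums[j]: j += 1` (v = nums[i])
def lcWhileA (s : List Int) (v : Int) (j : Nat) : Nat :=
  if h : j < s.length then
    if s[j] ≤ v then lcWhileA s v (j + 1) else j
  else j
termination_by s.length - j

-- `for i in range(n)` with state (j, ans); indexing is in range (i < n)
def lcLoopA (s : List Int) (i j : Nat) (ans : Int) : Int :=
  if i < s.length then
    let j' := lcWhileA s (s.getD i 0) j
    if j' < s.length then lcLoopA s (i + 1) (j' + 1) (ans + 1)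
    else lcLoopA s (i + 1) j' ans
  else ans
termination_by s.length - i

def lc_2592 (nums : List Int) : Int :=
  let s := PySem.List.sorted nums (fun x => x) false   -- nums.sort()
  lcLoopA s 0 0 0

-- ===== PORT B =====
-- inner `while j < n and nums[j] == nums[i]: j += 1` (v = nums[i])
def lcWhileB (s : List Int) (v : Int) (j : Nat) : Nat :=
  if h : j < s.length then
    if s[j] == v then lcWhileB s v (j + 1) else j
  else j
termination_by s.length - j

-- the inner while never moves j backwards (needed for outer-loop termination)
theorem lcWhileB_ge (s : List Int) (v : Int) (j : Nat) : j ≤ lcWhileB s v j := by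
  unfold lcWhileB
  split
  · split
    · exact le_trans (Nat.le_succ j) (lcWhileB_ge s v (j + 1))
    · exact le_refl j
  · exact le_refl j
termination_by s.length - j

-- outer `while i < n` with state (i, best)
def lcLoopB (s : List Int) (i best : Nat) : Nat :=
  if _h : i < s.length then
    let j := lcWhileB s (s.getD i 0) (i + 1)
    lcLoopB s j (max best (j - i))
  else best
termination_by s.length - i
decreasing_by
  have := lcWhileB_ge s (s.getD i 0) (i + 1)
  omega

def lc_2592_alt (nums : List Int) : Int :=
  let s := PySem.List.sorted nums (fun x => x) false   -- nums.sort()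
  (s.length : Int) - (lcLoopB s 0 0 : Int)

-- ===== PRECONDITION & SPEC =====
def Spec_lc_2592 (nums : List Int) (out : Int) : Prop := out = lc_2592_alt nums
instance (nums : List Int) (out : Int) : Decidable (Spec_lc_2592 nums out) := by unfold Spec_lc_2592; infer_instance

-- ===== CLAIM (what is proved, stated in full; the proofs are below) =====
def Claim_equal_lc_2592 : Prop := ∀ (nums : List Int), Dom_lc_2592 nums → Spec_lc_2592 nums (lc_2592 nums)

-- ===== LEMMAS AND PROOFS =====

-- number of elements ≤ v ("upper bound index" in the sorted list)
def ubc (s : List Int) (v : Int) : Nat := s.countP (fun x => decide (x ≤ v))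

-- the quantity both loops are about: ubc s s[t] - t
def Kval (s : List Int) (t : Nat) : Nat := ubc s (s.getD t 0) - t

def Kmax (s : List Int) (ts : List Nat) : Nat :=
  ts.foldr (fun t m => max (Kval s t) m) 0

theorem ubc_le_length (s : List Int) (v : Int) : ubc s v ≤ s.length :=
  List.countP_le_length

theorem Kmax_cons (s : List Int) (x : Nat) (r : List Nat) :
    Kmax s (x :: r) = max (Kval s x) (Kmax s r) := rfl

theorem Kmax_append (s : List Int) (a b : List Nat) :
    Kmax s (a ++ b) = max (Kmax s a) (Kmax s b) := by
  induction a with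
  | nil => simp [Kmax]
  | cons x t ih =>
    rw [List.cons_append, Kmax_cons, Kmax_cons, ih, Nat.max_assoc]

theorem le_Kmax (s : List Int) (ts : List Nat) (t : Nat) (ht : t ∈ ts) :
    Kval s t ≤ Kmax s ts := by
  induction ts with
  | nil => cases ht
  | cons x r ih =>
    rw [Kmax_cons]
    rcases List.mem_cons.mp ht with h | h
    · subst h; exact Nat.le_max_left _ _
    · exact le_trans (ih h) (Nat.le_max_right _ _)

theorem Kmax_le (s : List Int) (ts : List Nat) (m : Nat)
    (h : ∀ t ∈ ts, Kval s t ≤ m) : Kmax s ts ≤ m := by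
  induction ts with
  | nil => exact Nat.zero_le m
  | cons x r ih =>
    rw [Kmax_cons]
    exact Nat.max_le.mpr ⟨h x List.mem_cons_self, ih (fun t ht => h t (List.mem_cons_of_mem _ ht))⟩

theorem Kmax_attain (s : List Int) (ts : List Nat) :
    Kmax s ts = 0 ∨ ∃ t ∈ ts, Kval s t = Kmax s ts := by
  induction ts with
  | nil => left; rfl
  | cons x r ih =>
    have hc := Kmax_cons s x r
    by_cases hx : Kmax s r ≤ Kval s x
    · right; exact ⟨x, List.mem_cons_self, by omega⟩
    · rcases ih with h0 | ⟨t, ht, he⟩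
      · left; omega
      · right; exact ⟨t, List.mem_cons_of_mem _ ht, by omega⟩

-- core position lemma on a sorted list: s[idx] ≤ v ↔ idx < ubc s v
theorem sorted_le_iff (s : List Int) (hs : s.Pairwise (· ≤ ·)) (idx : Nat)
    (hidx : idx < s.length) (v : Int) : s[idx] ≤ v ↔ idx < ubc s v := by
  induction s generalizing idx with
  | nil => cases hidx
  | cons x t ih =>
    obtain ⟨hxt, hpt⟩ := List.pairwise_cons.mp hs
    by_cases hxv : x ≤ v
    · have hc : ubc (x :: t) v = ubc t v + 1 := by
        simp [ubc, hxv]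
      cases idx with
      | zero =>
        rw [List.getElem_cons_zero, hc]
        constructor
        · intro _; omega
        · intro _; exact hxv
      | succ a =>
        have ha : a < t.length := by simpa using hidx
        rw [List.getElem_cons_succ, hc, ih hpt a ha]
        omega
    · have h0 : ubc t v = 0 := by
        apply List.countP_eq_zero.mpr
        intro y hy
        have := hxt y hy
        simp
        omega
      have hc : ubc (x :: t) v = 0 := by
        simp [ubc, hxv] at *
        exact h0
      cases idx with
      | zero =>
        rw [List.getElem_cons_zero, hc]
        constructor
        · intro hle; exact absurd hle hxv
        · intro hlt; omega
      | succ a =>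
        have ha : a < t.length := by simpa using hidx
        rw [List.getElem_cons_succ, hc]
        have hx_le : x ≤ t[a] := hxt _ (List.getElem_mem ha)
        constructor
        · intro hle; have : x ≤ v := le_trans hx_le hle; omega
        · intro hlt; omega

-- getD form of the position lemma (the ports index with getD)
theorem sorted_le_iffD (s : List Int) (hs : s.Pairwise (· ≤ ·)) (idx : Nat)
    (hidx : idx < s.length) (v : Int) : s.getD idx 0 ≤ v ↔ idx < ubc s v := by
  rw [List.getD_eq_getElem _ _ hidx]
  exact sorted_le_iff s hs idx hidx v

-- monotonicity of a sorted list by positions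
theorem sorted_mono (s : List Int) (hs : s.Pairwise (· ≤ ·)) (a b : Nat)
    (hab : a ≤ b) (hb : b < s.length) : s.getD a 0 ≤ s.getD b 0 := by
  rcases Nat.lt_or_ge a b with h | h
  · have ha : a < s.length := lt_trans h hb
    rw [List.getD_eq_getElem _ _ ha, List.getD_eq_getElem _ _ hb]
    exact (List.pairwise_iff_getElem.mp hs) a b ha hb h
  · have : a = b := le_antisymm hab h
    subst this; exact le_refl _

-- position itself is below its own ubc
theorem lt_ubc_self (s : List Int) (hs : s.Pairwise (· ≤ ·)) (t : Nat)
    (ht : t < s.length) : t < ubc s (s.getD t 0) :=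
  (sorted_le_iffD s hs t ht _).mp (le_refl _)

-- A's inner while jumps to max j (ubc s v)
theorem lcWhileA_eq (s : List Int) (hs : s.Pairwise (· ≤ ·)) (v : Int) (j : Nat)
    (hj : j ≤ s.length) : lcWhileA s v j = max j (ubc s v) := by
  unfold lcWhileA
  split
  · rename_i h
    split
    · rename_i hle
      have hlt : j < ubc s v := (sorted_le_iff s hs j h v).mp hle
      rw [lcWhileA_eq s hs v (j + 1) (by omega)]
      omega
    · rename_i hgt
      have : ¬ j < ubc s v := fun hlt => hgt ((sorted_le_iff s hs j h v).mpr hlt)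
      omega
  · rename_i h
    have := ubc_le_length s v
    omega
termination_by s.length - j

-- B's inner while (equality test) also jumps to max j ubc, for j past position i
theorem lcWhileB_eq (s : List Int) (hs : s.Pairwise (· ≤ ·)) (i : Nat)
    (hi : i < s.length) (j : Nat) (hij : i < j) (hj : j ≤ s.length) :
    lcWhileB s (s.getD i 0) j = max j (ubc s (s.getD i 0)) := by
  unfold lcWhileB
  split
  · rename_i h
    have hgd : s[j] = s.getD j 0 := (List.getD_eq_getElem _ _ h).symm
    split
    · rename_i heq
      have heq' : s[j] = s.getD i 0 := beq_iff_eq.mp heq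
      have hlt : j < ubc s (s.getD i 0) :=
        (sorted_le_iff s hs j h _).mp (le_of_eq heq')
      rw [lcWhileB_eq s hs i hi (j + 1) (by omega) (by omega)]
      omega
    · rename_i hne
      have : ¬ j < ubc s (s.getD i 0) := by
        intro hlt
        have hle : s[j] ≤ s.getD i 0 := (sorted_le_iff s hs j h _).mpr hlt
        have hge : s.getD i 0 ≤ s.getD j 0 := sorted_mono s hs i j (le_of_lt hij) h
        rw [← hgd] at hge
        have heqv : s[j] = s.getD i 0 := le_antisymm hle hge
        simp [heqv] at hne
      omega
  · rename_i h
    have := ubc_le_length s (s.getD i 0)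
    omega
termination_by s.length - j

-- K i = Kmax over [0, i)
theorem Kmax_range_succ (s : List Int) (i : Nat) :
    Kmax s (List.range (i + 1)) = max (Kmax s (List.range i)) (Kval s i) := by
  rw [List.range_succ, Kmax_append]
  simp [Kmax]

theorem Kmax_range_mono (s : List Int) (i j : Nat) (h : i ≤ j) :
    Kmax s (List.range i) ≤ Kmax s (List.range j) := by
  apply Kmax_le
  intro t ht
  exact le_Kmax s _ t (List.mem_range.mpr (lt_of_lt_of_le (List.mem_range.mp ht) h))

-- helper': i + K n ≤ max (i + K i) n
theorem K_helper (s : List Int) (hs : s.Pairwise (· ≤ ·)) (i : Nat)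
    (hi : i ≤ s.length) :
    i + Kmax s (List.range s.length) ≤ max (i + Kmax s (List.range i)) s.length := by
  rcases Kmax_attain s (List.range s.length) with h0 | ⟨r, hr, he⟩
  · omega
  · have hrn : r < s.length := List.mem_range.mp hr
    rcases Nat.lt_or_ge r i with hri | hri
    · have := le_Kmax s (List.range i) r (List.mem_range.mpr hri)
      omega
    · have hub := ubc_le_length s (s.getD r 0)
      have hkv : Kval s r = ubc s (s.getD r 0) - r := rfl
      have hself := lt_ubc_self s hs r hrn
      omega

-- tail of A's loop once j = n: ans is returned unchanged
theorem lcLoopA_stuck (s : List Int) (i : Nat) (ans : Int) :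
    lcLoopA s i s.length ans = ans := by
  unfold lcLoopA
  split
  · rename_i h
    have hw : lcWhileA s (s.getD i 0) s.length = s.length := by
      unfold lcWhileA; simp
    rw [hw]
    simp
    exact lcLoopA_stuck s (i + 1) ans
  · rfl
termination_by s.length - i

-- main invariant of A's loop (matching phase): state (i, i + K i, ans)
theorem lcLoopA_main (s : List Int) (hs : s.Pairwise (· ≤ ·)) (i : Nat)
    (hi : i ≤ s.length) (hinv : i + Kmax s (List.range i) ≤ s.length) (ans : Int) :
    lcLoopA s i (i + Kmax s (List.range i)) ans
      = ans + ((s.length - Kmax s (List.range s.length) - i : Nat) : Int) := by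
  unfold lcLoopA
  split
  · rename_i h
    have hub_ge : i < ubc s (s.getD i 0) := lt_ubc_self s hs i h
    have hub_le : ubc s (s.getD i 0) ≤ s.length := ubc_le_length s _
    have hw : lcWhileA s (s.getD i 0) (i + Kmax s (List.range i))
        = max (i + Kmax s (List.range i)) (ubc s (s.getD i 0)) :=
      lcWhileA_eq s hs _ _ hinv
    have hK1 : max (i + Kmax s (List.range i)) (ubc s (s.getD i 0))
        = i + Kmax s (List.range (i + 1)) := by
      rw [Kmax_range_succ]
      simp [Kval]
      omega
    rw [hw, hK1]
    have hKn := Kmax_range_mono s (i + 1) s.length (by omega)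
    dsimp only
    split
    · -- match: i + K(i+1) < n
      rename_i hm
      have hrec := lcLoopA_main s hs (i + 1) (by omega) (by omega) (ans + 1)
      have harg : i + Kmax s (List.range (i + 1)) + 1
          = (i + 1) + Kmax s (List.range (i + 1)) := by omega
      rw [harg, hrec]
      -- need i + 1 ≤ n - K n, i.e. (i+1) + K n ≤ n
      have hh := K_helper s hs (i + 1) (by omega)
      have : (i + 1) + Kmax s (List.range s.length) ≤ s.length := by omega
      have hc1 : (s.length - Kmax s (List.range s.length) - (i + 1) : Nat) + 1
          = (s.length - Kmax s (List.range s.length) - i : Nat) := by omega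
      push_cast [← hc1]
      ring
    · -- fail: j' = n, ans returned
      rename_i hm
      have hj' : i + Kmax s (List.range (i + 1)) = s.length := by omega
      rw [hj', lcLoopA_stuck]
      have : s.length ≤ i + Kmax s (List.range s.length) := by omega
      have hz : (s.length - Kmax s (List.range s.length) - i : Nat) = 0 := by omega
      rw [hz]
      simp
  · rename_i h
    have hin : i = s.length := by omega
    subst hin
    have : Kmax s (List.range s.length) = 0 := by omega
    rw [this]
    simp
termination_by s.length - i

theorem range'_split (a k m : Nat) :
    List.range' a (k + m) = List.range' a k ++ List.range' (a + k) m := by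
  induction k generalizing a with
  | zero => simp
  | succ p ih =>
    have h1 : p + 1 + m = (p + m) + 1 := by omega
    rw [h1, List.range'_succ, ih (a + 1), List.range'_succ, ← List.cons_append]
    have h2 : a + (p + 1) = a + 1 + p := by omega
    rw [h2]

-- B's outer loop computes max best (Kmax over [i, n))
theorem lcLoopB_main (s : List Int) (hs : s.Pairwise (· ≤ ·)) (i : Nat)
    (hi : i ≤ s.length) (best : Nat) :
    lcLoopB s i best = max best (Kmax s (List.range' i (s.length - i))) := by
  unfold lcLoopB
  split
  · rename_i h
    have hub_ge : i < ubc s (s.getD i 0) := lt_ubc_self s hs i h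
    have hub_le : ubc s (s.getD i 0) ≤ s.length := ubc_le_length s _
    have hw : lcWhileB s (s.getD i 0) (i + 1)
        = max (i + 1) (ubc s (s.getD i 0)) :=
      lcWhileB_eq s hs i h (i + 1) (by omega) (by omega)
    have hwu : lcWhileB s (s.getD i 0) (i + 1) = ubc s (s.getD i 0) := by omega
    rw [hwu]
    dsimp only
    rw [lcLoopB_main s hs (ubc s (s.getD i 0)) hub_le]
    -- split the index range at ubc s s[i]
    have hsplit : List.range' i (s.length - i)
        = List.range' i (ubc s (s.getD i 0) - i)
          ++ List.range' (ubc s (s.getD i 0)) (s.length - ubc s (s.getD i 0)) := by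
      have h1 : s.length - i = (ubc s (s.getD i 0) - i) + (s.length - ubc s (s.getD i 0)) := by
        omega
      rw [h1, range'_split]
      have h2 : i + (ubc s (s.getD i 0) - i) = ubc s (s.getD i 0) := by omega
      rw [h2]
    rw [hsplit, Kmax_append]
    -- Kmax over the run [i, ubc) equals ubc - i
    have hrun : Kmax s (List.range' i (ubc s (s.getD i 0) - i))
        = ubc s (s.getD i 0) - i := by
      apply le_antisymm
      · apply Kmax_le
        intro t ht
        have htm := List.mem_range'_1.mp ht
        have htlt : t < ubc s (s.getD i 0) := by omega
        have htn : t < s.length := by omega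
        have hle : s.getD t 0 ≤ s.getD i 0 := (sorted_le_iffD s hs t htn _).mpr htlt
        have hge : s.getD i 0 ≤ s.getD t 0 := sorted_mono s hs i t (by omega) htn
        have heq : s.getD t 0 = s.getD i 0 := le_antisymm hle hge
        have hkv : Kval s t = ubc s (s.getD t 0) - t := rfl
        have hu : ubc s (s.getD t 0) = ubc s (s.getD i 0) := by rw [heq]
        omega
      · have him : i ∈ List.range' i (ubc s (s.getD i 0) - i) := by
          apply List.mem_range'_1.mpr
          omega
        have := le_Kmax s _ i him
        have hkv : Kval s i = ubc s (s.getD i 0) - i := rfl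
        omega
    rw [hrun]
    omega
  · rename_i h
    have : s.length - i = 0 := by omega
    rw [this]
    simp [Kmax, List.range']
termination_by s.length - i
decreasing_by
  have := lcWhileB_ge s (s.getD i 0) (i + 1)
  omega

-- both sides against the common closed form n - K n
theorem lc_2592_closed (s : List Int) (hs : s.Pairwise (· ≤ ·)) :
    lcLoopA s 0 0 0 = (s.length : Int) - (lcLoopB s 0 0 : Int) := by
  have hA := lcLoopA_main s hs 0 (Nat.zero_le _) (by simp [Kmax]) 0
  have hB := lcLoopB_main s hs 0 (Nat.zero_le _) 0
  have hK0 : Kmax s (List.range 0) = 0 := by simp [Kmax]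
  rw [hK0] at hA
  simp only [Nat.add_zero] at hA hB
  have hr : List.range' 0 (s.length - 0) = List.range s.length := by
    simp [List.range_eq_range']
  rw [hr] at hB
  have hKn_le : Kmax s (List.range s.length) ≤ s.length := by
    apply Kmax_le
    intro t ht
    have hkv : Kval s t = ubc s (s.getD t 0) - t := rfl
    have := ubc_le_length s (s.getD t 0)
    omega
  rw [hA, hB]
  simp only [Nat.max_eq_right (Nat.zero_le _)]
  omega

-- ===== VERDICT (by name: the statement is the Claim_ definition above) =====
theorem lc_2592_spec : Claim_equal_lc_2592 := by
  intro nums _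
  unfold Spec_lc_2592 lc_2592 lc_2592_alt
  have hs : (PySem.List.sorted nums (fun x => x) false).Pairwise (· ≤ ·) := by
    have := PySem.List.sorted_pairwise (xs := nums) (key := fun x => x)
    simpa using this
  exact lc_2592_closed _ hs
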